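-- pv_equiv track=rewrite | github.com/FlaBBB/Cybers_security | Pico-CTF/Cryptography/New Caesar/solve.py | b16_decode
-- ===== SOURCE A (Python) =====
-- import string
--
-- ALPHABET = string.ascii_lowercase[:16]
--
-- def b16_decode(cipher):
--     plain = ""
--     temp = ""
--     for c in cipher:
--         if temp == "":
--             temp = "{0:04b}".format([i for i in range(len(ALPHABET)) if ALPHABET[i] == c][0])
--             continue
--         plain += chr(int(temp + "{0:04b}".format([i for i in range(len(ALPHABET)) if ALPHABET[i] == c][0]), base=2))
--         temp = ""
--     return plain
-- ===== SOURCE B (Python) =====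
-- import string
--
-- ALPHABET = string.ascii_lowercase[:16]
--
-- def b16_decode(cipher):
--     it = iter(cipher)
--     return ''.join(chr(16 * ALPHABET.index(a) + ALPHABET.index(b)) for a, b in zip(it, it))
-- ===== Notes on version B (the rewrite author's own statement) =====
-- stated objective: simpler
-- what changed: Replaces A's cross-iteration temp-string toggle with 4-bit binary-string formatting and int(...,base=2) parsing by pairwise iteration (zip of one iterator with itself) that computes each byte arithmetically as 16*ALPHABET.index(a)+ALPHABET.index(b) and joins the chr values once.
import Mathlib
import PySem

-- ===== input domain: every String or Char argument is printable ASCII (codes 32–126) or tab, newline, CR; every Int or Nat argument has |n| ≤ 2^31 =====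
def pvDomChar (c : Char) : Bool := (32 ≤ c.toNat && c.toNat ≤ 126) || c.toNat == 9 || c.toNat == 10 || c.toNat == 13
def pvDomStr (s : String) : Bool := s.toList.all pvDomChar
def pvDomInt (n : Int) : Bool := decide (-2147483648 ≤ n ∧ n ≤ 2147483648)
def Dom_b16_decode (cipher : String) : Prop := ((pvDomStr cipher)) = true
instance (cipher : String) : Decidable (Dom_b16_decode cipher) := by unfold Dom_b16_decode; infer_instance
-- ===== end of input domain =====

-- B replaces A's temp-string toggle + binary-string formatting/parsing by pairwise iteration
-- computing each byte arithmetically (simpler; same asymptotic cost).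

-- ===== PORT A =====

-- ALPHABET = string.ascii_lowercase[:16]
def pvAlphabet : List Char := PySem.List.slice "abcdefghijklmnopqrstuvwxyz".toList none (some 16)

-- "{0:04b}".format(n): 4-digit binary string; exact for 0 ≤ n < 16 (the only values A feeds it)
def pvFmt4 (n : Int) : List Char :=
  [if PySem.Int.mod (PySem.Int.floordiv n 8) 2 = 1 then '1' else '0',
   if PySem.Int.mod (PySem.Int.floordiv n 4) 2 = 1 then '1' else '0',
   if PySem.Int.mod (PySem.Int.floordiv n 2) 2 = 1 then '1' else '0',
   if PySem.Int.mod n 2 = 1 then '1' else '0']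

-- [i for i in range(len(ALPHABET)) if ALPHABET[i] == c][0]
-- the trailing [0] raises IndexError when c is not in ALPHABET; those inputs are outside Pre_ (getD 0 is never reached there)
def pvIdxA (c : Char) : Int :=
  (PySem.List.pyGet?
    ((PySem.List.pyRange 0 (pvAlphabet.length : Int) 1).filter
      (fun i => PySem.List.pyGetD pvAlphabet i ' ' == c)) 0).getD 0

-- one iteration of A's for-loop over state (plain, temp)
def pvStepA (st : List Char × List Char) (c : Char) : List Char × List Char :=
  if st.2 = [] then (st.1, pvFmt4 (pvIdxA c))
  else (st.1 ++ [Char.ofNat ((PySem.Int.ofCharsBase? (st.2 ++ pvFmt4 (pvIdxA c)) 2).getD 0).toNat], [])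

def b16_decode (cipher : String) : String :=
  String.ofList (cipher.toList.foldl pvStepA ([], [])).1

-- ===== PORT B =====

-- ALPHABET.index(c); ValueError (c ∉ ALPHABET) is outside Pre_, getD 0 never reached there
def pvIdxB (c : Char) : Nat := (PySem.List.index? pvAlphabet c).getD 0

-- zip(it, it) on one iterator: consecutive pairs, dropping a dangling last element
def pvPairs : List Char → List (Char × Char)
  | a :: b :: rest => (a, b) :: pvPairs rest
  | _ => []

def b16_decode_alt (cipher : String) : String :=
  String.ofList ((pvPairs cipher.toList).map (fun p => Char.ofNat (16 * pvIdxB p.1 + pvIdxB p.2)))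

-- ===== PRECONDITION & SPEC =====
-- exactly the inputs on which A returns: every character of cipher is in ALPHABET
-- (any character outside it makes A raise IndexError at its lookup)
def Pre_b16_decode (cipher : String) : Prop := (cipher.toList.all (fun c => pvAlphabet.contains c)) = true
instance (cipher : String) : Decidable (Pre_b16_decode cipher) := by unfold Pre_b16_decode; infer_instance

def pvWitness_b16_decode : String := "ljlj"

def Spec_b16_decode (cipher : String) (out : String) : Prop := out = b16_decode_alt cipher
instance (cipher : String) (out : String) : Decidable (Spec_b16_decode cipher out) := by unfold Spec_b16_decode; infer_instance

-- ===== CLAIM (what is proved, stated in full; the proofs are below) =====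
def Claim_equal_b16_decode : Prop := ∀ (cipher : String), Dom_b16_decode cipher → Pre_b16_decode cipher → Spec_b16_decode cipher (b16_decode cipher)

-- ===== LEMMAS AND PROOFS =====

theorem pvAlph_lit : pvAlphabet = ['a','b','c','d','e','f','g','h','i','j','k','l','m','n','o','p'] := by decide

-- on alphabet characters A's comprehension index agrees with B's ALPHABET.index, and is < 16
theorem pvIdx_eq : ∀ c ∈ pvAlphabet, pvIdxA c = (pvIdxB c : Int) ∧ pvIdxB c < 16 := by
  intro c hc
  rw [pvAlph_lit] at hc
  fin_cases hc <;> exact ⟨by decide, by decide⟩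

-- int(temp + bits, base=2) of two 4-bit groups is 16*i + j
theorem pvParse2 : ∀ i j : Nat, i < 16 → j < 16 →
    (PySem.Int.ofCharsBase? (pvFmt4 (i:Int) ++ pvFmt4 (j:Int)) 2).getD 0 = 16 * i + j := by
  intro i j hi hj
  interval_cases i <;> interval_cases j <;> decide

-- hence A's format-concat-parse byte equals B's arithmetic byte
theorem pvByte_eq : ∀ c1 ∈ pvAlphabet, ∀ c2 ∈ pvAlphabet,
    Char.ofNat ((PySem.Int.ofCharsBase? (pvFmt4 (pvIdxA c1) ++ pvFmt4 (pvIdxA c2)) 2).getD 0).toNat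
      = Char.ofNat (16 * pvIdxB c1 + pvIdxB c2) := by
  intro c1 h1 c2 h2
  obtain ⟨e1, l1⟩ := pvIdx_eq c1 h1
  obtain ⟨e2, l2⟩ := pvIdx_eq c2 h2
  rw [e1, e2, pvParse2 _ _ l1 l2]
  congr 1

theorem pvFoldA_spec : ∀ cs : List Char, (∀ c ∈ cs, c ∈ pvAlphabet) → ∀ plain : List Char,
    (cs.foldl pvStepA (plain, [])).1 = plain ++ (pvPairs cs).map (fun p => Char.ofNat (16 * pvIdxB p.1 + pvIdxB p.2))
  | [] => by intro _ plain; simp [pvPairs]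
  | [c] => by intro _ plain; simp [pvPairs, pvStepA]
  | a :: b :: rest => by
    intro h plain
    have ha : a ∈ pvAlphabet := h a (by simp)
    have hb : b ∈ pvAlphabet := h b (by simp)
    have hrest : ∀ c ∈ rest, c ∈ pvAlphabet := fun c hc => h c (by simp [hc])
    have h1 : pvStepA (plain, []) a = (plain, pvFmt4 (pvIdxA a)) := by simp [pvStepA]
    have h2 : pvStepA (plain, pvFmt4 (pvIdxA a)) b
        = (plain ++ [Char.ofNat ((PySem.Int.ofCharsBase? (pvFmt4 (pvIdxA a) ++ pvFmt4 (pvIdxA b)) 2).getD 0).toNat], []) := by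
      simp [pvStepA, pvFmt4]
    rw [List.foldl_cons, List.foldl_cons, h1, h2,
      pvFoldA_spec rest hrest (plain ++ [Char.ofNat ((PySem.Int.ofCharsBase? (pvFmt4 (pvIdxA a) ++ pvFmt4 (pvIdxA b)) 2).getD 0).toNat])]
    simp [pvPairs, pvByte_eq a ha b hb]

theorem b16_decode_spec' (cipher : String) (h : Pre_b16_decode cipher) :
    b16_decode cipher = b16_decode_alt cipher := by
  unfold Pre_b16_decode at h
  simp only [List.all_eq_true, List.contains_iff_mem] at h
  unfold b16_decode b16_decode_alt
  rw [pvFoldA_spec cipher.toList h []]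
  simp

-- ===== VERDICT (by name: the statement is the Claim_ definition above) =====
theorem b16_decode_spec : Claim_equal_b16_decode := by
  intro cipher _ hpre
  exact b16_decode_spec' cipher hpre
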